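-- pv_equiv track=rewrite | github.com/ardaakcabuyuk/real-time-speech-transcription | src/utils/audio_processing.py | u_law_e
-- ===== SOURCE A (Python) =====
-- BITMASK = 1
--
-- def u_law_e(i16bit: int) -> int:
--     '''
--     Encodes 16 bit PCM data to 8 bit u-law encoded data.
--     '''
--     i16bit &= 0x3fff # strips data bigger than 14 bits
--
--     pos = 12        # position is 12 since we are not calculating sign bit and 0 value
--                     # so 14 - sign == 13; so 13 bits, - 0 value ... 12 bits
--
--     msk = 0x1000    # mask 1 0000 0000 0000 # bitwise mask for singular bits
--
--     sign = 0x80 if i16bit&0x2000 else 0 # generating 8bit sign from 14 bit number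
--
--     if sign == 0x80: # if sign is present
--         i16bit = _twos_compliment(i16bit) # twos_compliment
--         i16bit &= 0x3ffe               # strips all bits larger than 14 bits
--
--     i16bit+=0b100001                    # adds 33, 0x21 = 10 0001
--
--     if i16bit > 0x1fff: i16bit = 0x1fff # if number is over maximum ... it becomes maximum
--
--     for x in reversed( range(pos) ):    # this number has least significant bits, not bit... so they have often size of 4 bits, that is why it must be larger than 5
--         if (i16bit & msk)!=msk and pos>=5:
--             pos = x
--             msk >>=1
--
--     LSBTS = ( i16bit >> (pos-4) )&0xf # grabbing mantissa from 16 bit integer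
--
--     encoded = sign          # sign
--     encoded += (pos-5)<<4    # exponent
--     encoded += LSBTS        # mantisa
--
--     return encoded^0xff # inverting all bits
--
-- def _twos_compliment(int_numb: int) -> int:
--     if not int_numb: return ~int_numb
--
--     lsb = _least_significant_bit(int_numb)
--     msb = _most_significant_bit(int_numb)
--     mask = ( 1<<lsb )-1
--     mask ^= ( 1<<msb )-1
--     return int_numb^mask
--
-- def _least_significant_bit(int_numb: int) -> int: ##returns position of the bit not the value of the bit
--     if int_numb == 0 : return 0
--     pos = 0
--     while 1:
--         if int_numb&(BITMASK<<pos)!=0:return pos+1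
--         pos+=1
--
-- def _most_significant_bit(int_numb: int) -> int:
--     BYTSHIFT = 8
--     mask    = 0x8000000000000000
--     chk_msk = 0xff00000000000000
--     pos = 64
--     while 1:
--         if int_numb&chk_msk==0:
--             chk_msk     >>= BYTSHIFT
--             mask        >>= BYTSHIFT
--             pos         -=  BYTSHIFT
--         else:
--             if int_numb&mask==0:
--                 mask >>= BITMASK
--                 pos   -= BITMASK
--             else:
--                 break
--
--         if pos == 0:break
--     return pos
-- ===== SOURCE B (Python) =====
-- def u_law_e(i16bit: int) -> int:
--     '''
--     Encodes 16 bit PCM data to 8 bit u-law encoded data.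
--     The magnitude of a negative sample is taken arithmetically (0x4000 - v,
--     i.e. two's-complement negation within 14 bits) instead of via the
--     bit-scanning _twos_compliment helper, and the exponent comes from
--     bit_length() instead of the downward mask-scanning loop.
--     '''
--     v = i16bit & 0x3fff                     # strip to 14 bits
--     if v & 0x2000:                          # negative sample
--         sign = 0x80
--         v = (0x4000 - v) & 0x3ffe           # arithmetic negation mod 2^14, bit 0 cleared
--     else:
--         sign = 0
--     v = min(v + 33, 0x1fff)                 # bias and clamp
--     pos = v.bit_length() - 1                # exponent: index of the highest set bit
--     mantissa = (v >> (pos - 4)) & 0xf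
--     return (sign | ((pos - 5) << 4) | mantissa) ^ 0xff
-- ===== Notes on version B (the rewrite author's own statement) =====
-- stated objective: simpler
-- what changed: The _twos_compliment/_least_significant_bit/_most_significant_bit bit-scanning helpers are removed entirely (the negative-sample magnitude is the arithmetic two's-complement negation (0x4000 - v) & 0x3ffe) and the downward mask-scanning exponent loop is replaced by the closed-form bit_length(); the byte is assembled with '|' of the disjoint sign/exponent/mantissa fields.
import Mathlib
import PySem

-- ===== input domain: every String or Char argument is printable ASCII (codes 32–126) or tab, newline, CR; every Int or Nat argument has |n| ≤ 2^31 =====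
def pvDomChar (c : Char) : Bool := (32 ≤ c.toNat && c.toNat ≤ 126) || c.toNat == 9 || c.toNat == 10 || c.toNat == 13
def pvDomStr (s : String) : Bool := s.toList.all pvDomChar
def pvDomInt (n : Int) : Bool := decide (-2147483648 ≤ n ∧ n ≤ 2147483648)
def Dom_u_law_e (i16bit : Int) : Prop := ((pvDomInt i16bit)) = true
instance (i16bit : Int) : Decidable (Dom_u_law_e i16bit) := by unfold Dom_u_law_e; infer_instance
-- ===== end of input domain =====

-- B drops A's bit-scanning helpers entirely: the magnitude of a negative sample is
-- taken arithmetically (0x4000 - v, two's-complement negation within 14 bits) instead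
-- of via the _twos_compliment/_least_significant_bit/_most_significant_bit machinery,
-- and the exponent comes from bit_length() instead of the downward mask-scanning loop;
-- objective: simpler.

-- ===== PORT A =====
-- _least_significant_bit's 'while 1' loop; the fuel only makes the recursion total
-- (callers pass nonzero 14-bit numbers, where 64 iterations always suffice).
def pvLsbLoop (n : Int) (pos : Nat) : Nat → Int
  | 0 => 0
  | fuel + 1 =>
    if PySem.Int.band n ((1 : Int) <<< pos) ≠ 0 then (pos : Int) + 1
    else pvLsbLoop n (pos + 1) fuel

def pvLeastSignificantBit (int_numb : Int) : Int :=
  if int_numb = 0 then 0 else pvLsbLoop int_numb 0 64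

-- _most_significant_bit's 'while 1' loop; pos drops by 8 or 1 every continuing
-- iteration from 64, so 80 units of fuel are never exhausted.
def pvMsbLoop (n : Int) (chk_msk mask pos : Int) : Nat → Int
  | 0 => pos
  | fuel + 1 =>
    if PySem.Int.band n chk_msk = 0 then
      let chk_msk := chk_msk >>> (8:Nat)
      let mask := mask >>> (8:Nat)
      let pos := pos - 8
      if pos = 0 then pos else pvMsbLoop n chk_msk mask pos fuel
    else if PySem.Int.band n mask = 0 then
      let mask := mask >>> (1:Nat)
      let pos := pos - 1
      if pos = 0 then pos else pvMsbLoop n chk_msk mask pos fuel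
    else pos

def pvMostSignificantBit (int_numb : Int) : Int :=
  pvMsbLoop int_numb 0xff00000000000000 0x8000000000000000 64 80

-- _twos_compliment; lsb/msb are ≥ 1 whenever this is called with a nonzero
-- number, so .toNat on the shift amounts is exact.
def pvTwosCompliment (int_numb : Int) : Int :=
  if int_numb = 0 then Int.not int_numb
  else
    let lsb := pvLeastSignificantBit int_numb
    let msb := pvMostSignificantBit int_numb
    let mask := ((1 : Int) <<< lsb.toNat) - 1
    let mask := PySem.Int.bxor mask (((1 : Int) <<< msb.toNat) - 1)
    PySem.Int.bxor int_numb mask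

def u_law_e (i16bit : Int) : Int :=
  let i1 := PySem.Int.band i16bit 0x3fff
  let sign : Int := if PySem.Int.band i1 0x2000 ≠ 0 then 0x80 else 0
  let i2 := if sign = 0x80 then PySem.Int.band (pvTwosCompliment i1) 0x3ffe else i1
  let i3 := i2 + 33
  let i4 := if i3 > 0x1fff then 0x1fff else i3
  -- 'for x in reversed(range(pos))' with initial pos = 12, msk = 0x1000; state (pos, msk)
  let st := (List.range 12).reverse.foldl
    (fun (st : Int × Int) (x : Nat) =>
      if PySem.Int.band i4 st.2 ≠ st.2 ∧ 5 ≤ st.1 then ((x : Int), st.2 >>> (1:Nat)) else st)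
    ((12 : Int), (0x1000 : Int))
  let pos := st.1
  -- pos - 4 ≥ 1 always holds here, so .toNat is exact for the shift amount
  let lsbts := PySem.Int.band (i4 >>> (pos - 4).toNat) 0xf
  PySem.Int.bxor (sign + ((pos - 5) <<< (4:Nat)) + lsbts) 0xff

-- ===== PORT B =====
def u_law_e_alt (i16bit : Int) : Int :=
  let v0 := PySem.Int.band i16bit 0x3fff
  let sv : Int × Int :=
    if PySem.Int.band v0 0x2000 ≠ 0 then (0x80, PySem.Int.band (0x4000 - v0) 0x3ffe)
    else (0, v0)
  let v1 := min (sv.2 + 33) 0x1fff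
  let pos : Int := (PySem.Int.bitLength v1 : Int) - 1
  -- the bias keeps pos - 4 ≥ 1 here, so .toNat is exact for the shift amount
  let mantissa := PySem.Int.band (v1 >>> (pos - 4).toNat) 0xf
  PySem.Int.bxor (PySem.Int.bor (PySem.Int.bor sv.1 ((pos - 5) <<< (4:Nat))) mantissa) 0xff

-- ===== PRECONDITION & SPEC =====
def Spec_u_law_e (i16bit : Int) (out : Int) : Prop := out = u_law_e_alt i16bit
instance (i16bit : Int) (out : Int) : Decidable (Spec_u_law_e i16bit out) := by unfold Spec_u_law_e; infer_instance

-- ===== CLAIM (what is proved, stated in full; the proofs are below) =====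
def Claim_equal_u_law_e : Prop := ∀ (i16bit : Int), Dom_u_law_e i16bit → Spec_u_law_e i16bit (u_law_e i16bit)

-- ===== LEMMAS AND PROOFS =====

-- 'i16bit &= 0x3fff': masking with 2^14 - 1 is reduction mod 2^14
theorem pv_band_mask (n : Int) : PySem.Int.band n 16383 = n % 16384 := by
  have h1 : ∀ m : Nat, m &&& 16383 = m % 16384 := by
    intro m
    have := Nat.and_two_pow_sub_one_eq_mod m 14
    norm_num at this; exact this
  by_cases h : 0 ≤ n
  · rw [PySem.Int.band_of_nonneg h (by norm_num)]
    rw [show n.toNat &&& (16383 : Int).toNat = n.toNat % 16384 from h1 n.toNat]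
    omega
  · have hb : PySem.Int.band n 16383
        = (((16383 : Int).toNat - ((16383 : Int).toNat &&& (-n - 1).toNat) : Nat) : Int) := by
      simp only [PySem.Int.band, if_neg h, if_pos (show (0 : Int) ≤ 16383 by norm_num)]
    have h2 : (16383 : Int).toNat &&& (-n - 1).toNat = (-n - 1).toNat % 16384 := by
      rw [Nat.land_comm]; exact h1 (-n - 1).toNat
    rw [hb, h2, show ((16383 : Int).toNat) = 16383 from rfl]
    omega

-- the '& 0x3ffe' in the sign branch keeps the value inside [0, 0x3ffe]
theorem pv_band_16382_bounds (x : Int) :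
    0 ≤ PySem.Int.band x 16382 ∧ PySem.Int.band x 16382 ≤ 16382 := by
  by_cases h : 0 ≤ x
  · rw [PySem.Int.band_of_nonneg h (by norm_num)]
    have := Nat.and_le_right (n := x.toNat) (m := (16382 : Int).toNat)
    have h16 : ((16382 : Int).toNat) = 16382 := rfl
    omega
  · have hb : PySem.Int.band x 16382
        = (((16382 : Int).toNat - ((16382 : Int).toNat &&& (-x - 1).toNat) : Nat) : Int) := by
      simp only [PySem.Int.band, if_neg h, if_pos (show (0 : Int) ≤ 16382 by norm_num)]
    rw [hb, show ((16382 : Int).toNat) = 16382 from rfl]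
    omega

-- the sign test 'i16bit & 0x2000': nonzero exactly on the upper half of the 14-bit range
theorem pv_sign_test (m : Int) (h0 : 0 ≤ m) (h1 : m < 16384) :
    (PySem.Int.band m 8192 ≠ 0 ↔ 8192 ≤ m) := by
  rw [PySem.Int.band_of_nonneg h0 (by norm_num)]
  rw [show ((8192 : Int).toNat) = 2 ^ 13 from rfl, Nat.and_two_pow]
  have ht : m.toNat.testBit 13 = decide (m.toNat / 2 ^ 13 % 2 = 1) :=
    Nat.testBit_eq_decide_div_mod_eq
  by_cases hd : m.toNat / 2 ^ 13 % 2 = 1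
  · have hb : m.toNat.testBit 13 = true := by rw [ht]; simpa using hd
    rw [hb]
    norm_num at hd ⊢
    omega
  · have hb : m.toNat.testBit 13 = false := by rw [ht]; simpa using hd
    rw [hb]
    norm_num at hd ⊢
    omega

-- the _twos_compliment of A followed by '& 0x3ffe' is B's arithmetic '(0x4000 - v) & 0x3ffe'
-- on every 14-bit value with the sign bit set (exhaustive over the 8192 such values, in four blocks)
set_option maxHeartbeats 10000000 in
set_option maxRecDepth 1000000 in
theorem pv_twos_eq_0 : ∀ w : Fin 2048,
    PySem.Int.band (pvTwosCompliment ((8192 + (w : Nat) : Nat) : Int)) 16382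
      = PySem.Int.band ((16384 - (8192 + (w : Nat) : Nat) : Nat) : Int) 16382 := by decide

set_option maxHeartbeats 10000000 in
set_option maxRecDepth 1000000 in
theorem pv_twos_eq_1 : ∀ w : Fin 2048,
    PySem.Int.band (pvTwosCompliment ((10240 + (w : Nat) : Nat) : Int)) 16382
      = PySem.Int.band ((16384 - (10240 + (w : Nat) : Nat) : Nat) : Int) 16382 := by decide

set_option maxHeartbeats 10000000 in
set_option maxRecDepth 1000000 in
theorem pv_twos_eq_2 : ∀ w : Fin 2048,
    PySem.Int.band (pvTwosCompliment ((12288 + (w : Nat) : Nat) : Int)) 16382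
      = PySem.Int.band ((16384 - (12288 + (w : Nat) : Nat) : Nat) : Int) 16382 := by decide

set_option maxHeartbeats 10000000 in
set_option maxRecDepth 1000000 in
theorem pv_twos_eq_3 : ∀ w : Fin 2048,
    PySem.Int.band (pvTwosCompliment ((14336 + (w : Nat) : Nat) : Int)) 16382
      = PySem.Int.band ((16384 - (14336 + (w : Nat) : Nat) : Nat) : Int) 16382 := by decide

theorem pv_twos_eq_all (V : Nat) (h1 : 8192 ≤ V) (h2 : V < 16384) :
    PySem.Int.band (pvTwosCompliment ((V : Nat) : Int)) 16382
      = PySem.Int.band ((16384 - V : Nat) : Int) 16382 := by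
  by_cases hA : V < 10240
  · have h := pv_twos_eq_0 ⟨V - 8192, by omega⟩
    rwa [show (8192 + (V - 8192) : Nat) = V by omega] at h
  · by_cases hB : V < 12288
    · have h := pv_twos_eq_1 ⟨V - 10240, by omega⟩
      rwa [show (10240 + (V - 10240) : Nat) = V by omega] at h
    · by_cases hC : V < 14336
      · have h := pv_twos_eq_2 ⟨V - 12288, by omega⟩
        rwa [show (12288 + (V - 12288) : Nat) = V by omega] at h
      · have h := pv_twos_eq_3 ⟨V - 14336, by omega⟩
        rwa [show (14336 + (V - 14336) : Nat) = V by omega] at h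

-- once A's loop's mask has reached the top set bit, the state never changes again
theorem pvStay (v : Int) (V k : Nat) (hv : v = (V : Int)) (ht : V.testBit k = true) :
    ∀ (xs : List Nat) (p : Int),
      xs.foldl
        (fun (st : Int × Int) (x : Nat) =>
          if PySem.Int.band v st.2 ≠ st.2 ∧ 5 ≤ st.1 then ((x : Int), st.2 >>> (1:Nat)) else st)
        (p, ((2 ^ k : Nat) : Int)) = (p, ((2 ^ k : Nat) : Int)) := by
  intro xs
  induction xs with
  | nil => intro p; rfl
  | cons x xs ih =>
    intro p
    have hband : PySem.Int.band v ((2 ^ k : Nat) : Int) = ((2 ^ k : Nat) : Int) := by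
      rw [hv, PySem.Int.band_natCast, Nat.and_two_pow, ht]
      norm_num
    simp only [List.foldl_cons, hband, ne_eq, not_true_eq_false, false_and, if_false]
    exact ih p

-- while the mask is above the top set bit, each iteration moves (pos, msk) one step down
theorem pvLoop (v : Int) (V k : Nat) (hv : v = (V : Int)) (hk5 : 5 ≤ k)
    (hlo : 2 ^ k ≤ V) (hhi : V < 2 ^ (k + 1)) :
    ∀ n : Nat, k ≤ n →
      (List.range n).reverse.foldl
        (fun (st : Int × Int) (x : Nat) =>
          if PySem.Int.band v st.2 ≠ st.2 ∧ 5 ≤ st.1 then ((x : Int), st.2 >>> (1:Nat)) else st)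
        (((n : Nat) : Int), ((2 ^ n : Nat) : Int)) = ((k : Int), ((2 ^ k : Nat) : Int)) := by
  have ht : V.testBit k = true := by
    rw [Nat.testBit_eq_decide_div_mod_eq]
    have h3 : V / 2 ^ k = 1 := Nat.div_eq_of_lt_le (by omega) (by rw [pow_succ] at hhi; omega)
    simp [h3]
  intro n hkn
  induction n, hkn using Nat.le_induction with
  | base => exact pvStay v V k hv ht _ _
  | succ n hkn ih =>
    have htb : V.testBit (n + 1) = false :=
      Nat.testBit_lt_two_pow (lt_of_lt_of_le hhi (Nat.pow_le_pow_right (by norm_num) (by omega)))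
    have hband : PySem.Int.band v ((2 ^ (n + 1) : Nat) : Int) = 0 := by
      rw [hv, PySem.Int.band_natCast, Nat.and_two_pow, htb]
      norm_num
    have hne : (0 : Int) ≠ ((2 ^ (n + 1) : Nat) : Int) := by
      have := Nat.two_pow_pos (n + 1)
      omega
    have hstep : ((2 ^ (n + 1) : Nat) : Int) >>> (1:Nat) = ((2 ^ n : Nat) : Int) := by
      rw [← Int.natCast_shiftRight]
      congr 1
      rw [Nat.shiftRight_eq_div_pow, pow_succ, pow_one, Nat.mul_div_cancel]
      norm_num
    have h5 : (5 : Int) ≤ ((n + 1 : Nat) : Int) := by omega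
    rw [show List.range (n + 1) = List.range n ++ [n] from List.range_succ]
    rw [List.reverse_append]
    simp only [List.reverse_singleton, List.singleton_append, List.foldl_cons]
    rw [if_pos ⟨by rw [hband]; exact hne, h5⟩]
    rw [hstep]
    exact ih

-- A's scan loop computes exactly bit_length - 1 on the biased, clamped value
theorem pvPosEq (v : Int) (h33 : 33 ≤ v) (h81 : v ≤ 8191) :
    ((List.range 12).reverse.foldl
        (fun (st : Int × Int) (x : Nat) =>
          if PySem.Int.band v st.2 ≠ st.2 ∧ 5 ≤ st.1 then ((x : Int), st.2 >>> (1:Nat)) else st)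
        ((12 : Int), (4096 : Int))).1 = (PySem.Int.bitLength v : Int) - 1 := by
  have hv : v = ((v.toNat : Nat) : Int) := by omega
  set V := v.toNat with hVdef
  have hna : v.natAbs = V := by omega
  have hV33 : 33 ≤ V := by omega
  have hV81 : V ≤ 8191 := by omega
  have hup : V < 2 ^ PySem.Int.bitLength v := by
    have := PySem.Int.lt_two_pow_bitLength v
    rwa [hna] at this
  have hlow : 2 ^ (PySem.Int.bitLength v - 1) ≤ V := by
    have := PySem.Int.two_pow_bitLength_le v (by omega)
    rwa [hna] at this
  have hbl1 : PySem.Int.bitLength v ≠ 0 := by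
    intro h0
    rw [h0] at hup
    norm_num at hup
    omega
  set k := PySem.Int.bitLength v - 1 with hk
  have hblk : PySem.Int.bitLength v = k + 1 := by omega
  have hhi : V < 2 ^ (k + 1) := by rw [← hblk]; exact hup
  have hk5 : 5 ≤ k := by
    by_contra hc
    push Not at hc
    have : V < 2 ^ 5 := lt_of_lt_of_le hhi (Nat.pow_le_pow_right (by norm_num) (by omega))
    norm_num at this
    omega
  have hmain := pvLoop v V k hv hk5 hlow hhi 12 (by
    by_contra hc
    push Not at hc
    have : 2 ^ 13 ≤ V := le_trans (Nat.pow_le_pow_right (by norm_num) (by omega)) hlow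
    norm_num at this
    omega)
  rw [show ((12 : Nat) : Int) = (12 : Int) by norm_num,
      show ((2 ^ 12 : Nat) : Int) = (4096 : Int) by norm_num] at hmain
  rw [hmain, hblk]
  push_cast
  ring

-- bit_length of the biased, clamped value lands in [6, 13]
theorem pv_bl_bounds (v : Int) (h33 : 33 ≤ v) (h81 : v ≤ 8191) :
    6 ≤ PySem.Int.bitLength v ∧ PySem.Int.bitLength v ≤ 13 := by
  have hna : 33 ≤ v.natAbs ∧ v.natAbs ≤ 8191 := by omega
  have hup := PySem.Int.lt_two_pow_bitLength v
  have hlow := PySem.Int.two_pow_bitLength_le v (by omega)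
  constructor
  · by_contra hc
    push Not at hc
    have : (2:Nat) ^ PySem.Int.bitLength v ≤ 2 ^ 5 := Nat.pow_le_pow_right (by norm_num) (by omega)
    norm_num at this
    omega
  · by_contra hc
    push Not at hc
    have : (2:Nat) ^ 13 ≤ 2 ^ (PySem.Int.bitLength v - 1) := Nat.pow_le_pow_right (by norm_num) (by omega)
    norm_num at this
    omega

-- sign (0 or 0x80), exponent field (16·p, p < 8) and mantissa (q < 16) occupy
-- disjoint bits, so A's '+' assembly and B's '|' assembly coincide
theorem pv_bor_add_nat : ∀ (s : Fin 2) (p : Fin 8) (q : Fin 16),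
    (128 * s.val) ||| (16 * p.val) ||| q.val = 128 * s.val + 16 * p.val + q.val := by decide

theorem pv_assemble (sign e t : Int) (hs : sign = 0 ∨ sign = 128)
    (he : ∃ p : Nat, p < 8 ∧ e = ((16 * p : Nat) : Int))
    (ht : ∃ q : Nat, q < 16 ∧ t = ((q : Nat) : Int)) :
    sign + e + t = PySem.Int.bor (PySem.Int.bor sign e) t := by
  obtain ⟨p, hp, rfl⟩ := he
  obtain ⟨q, hq, rfl⟩ := ht
  rcases hs with rfl | rfl
  · have h := pv_bor_add_nat ⟨0, by norm_num⟩ ⟨p, hp⟩ ⟨q, hq⟩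
    rw [show (0 : Int) = ((128 * 0 : Nat) : Int) by norm_num]
    rw [PySem.Int.bor_natCast, PySem.Int.bor_natCast, h]
    push_cast
    ring
  · have h := pv_bor_add_nat ⟨1, by norm_num⟩ ⟨p, hp⟩ ⟨q, hq⟩
    rw [show (128 : Int) = ((128 * 1 : Nat) : Int) by norm_num]
    rw [PySem.Int.bor_natCast, PySem.Int.bor_natCast, h]
    push_cast
    ring

-- the common tail: bias/clamp done, both sides assemble the byte from the same
-- exponent (A via the scan loop = bit_length by pvPosEq) and mantissa
theorem pv_tail (sign v : Int) (hs : sign = 0 ∨ sign = 128) (h33 : 33 ≤ v) (h81 : v ≤ 8191) :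
    PySem.Int.bxor
      (sign
        + ((((List.range 12).reverse.foldl
              (fun (st : Int × Int) (x : Nat) =>
                if PySem.Int.band v st.2 ≠ st.2 ∧ 5 ≤ st.1 then ((x : Int), st.2 >>> (1:Nat)) else st)
              ((12 : Int), (4096 : Int))).1 - 5) <<< (4:Nat))
        + PySem.Int.band (v >>> (((List.range 12).reverse.foldl
              (fun (st : Int × Int) (x : Nat) =>
                if PySem.Int.band v st.2 ≠ st.2 ∧ 5 ≤ st.1 then ((x : Int), st.2 >>> (1:Nat)) else st)
              ((12 : Int), (4096 : Int))).1 - 4).toNat) 15) 255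
    = PySem.Int.bxor
        (PySem.Int.bor
          (PySem.Int.bor sign ((((PySem.Int.bitLength v : Int) - 1) - 5) <<< (4:Nat)))
          (PySem.Int.band (v >>> (((PySem.Int.bitLength v : Int) - 1) - 4).toNat) 15)) 255 := by
  rw [pvPosEq v h33 h81]
  congr 1
  obtain ⟨hbl6, hbl13⟩ := pv_bl_bounds v h33 h81
  apply pv_assemble _ _ _ hs
  · refine ⟨PySem.Int.bitLength v - 6, by omega, ?_⟩
    rw [show ((PySem.Int.bitLength v : Int) - 1 - 5) = ((PySem.Int.bitLength v - 6 : Nat) : Int) by omega]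
    rw [← Int.natCast_shiftLeft]
    congr 1
    rw [Nat.shiftLeft_eq]
    ring
  · set k := (((PySem.Int.bitLength v : Int) - 1) - 4).toNat with hk
    have hsh : v >>> k = ((v.toNat >>> k : Nat) : Int) := by
      conv_lhs => rw [show v = ((v.toNat : Nat) : Int) by omega]
      rw [← Int.natCast_shiftRight]
    rw [hsh, PySem.Int.band_of_nonneg (by positivity) (by norm_num)]
    refine ⟨(((v.toNat >>> k : Nat) : Int)).toNat &&& (15 : Int).toNat, ?_, rfl⟩
    have := Nat.and_le_right (n := (((v.toNat >>> k : Nat) : Int)).toNat) (m := (15 : Int).toNat)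
    have h15 : ((15 : Int).toNat) = 15 := rfl
    omega

-- ===== VERDICT (by name: the statement is the Claim_ definition above) =====
theorem u_law_e_spec : Claim_equal_u_law_e := by
  intro n _
  unfold Spec_u_law_e
  show u_law_e n = u_law_e_alt n
  simp only [u_law_e, u_law_e_alt]
  rw [pv_band_mask n]
  have hm0 : 0 ≤ n % 16384 := Int.emod_nonneg n (by norm_num)
  have hm1 : n % 16384 < 16384 := Int.emod_lt_of_pos n (by norm_num)
  by_cases hsgn : PySem.Int.band (n % 16384) 8192 ≠ 0
  · simp only [if_pos hsgn, if_true]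
    -- the negative branch: rewrite A's _twos_compliment with the exhaustive lemma
    have h13 : 8192 ≤ n % 16384 := (pv_sign_test (n % 16384) hm0 hm1).mp hsgn
    have htc := pv_twos_eq_all (n % 16384).toNat (by omega) (by omega)
    rw [show (((n % 16384).toNat : Nat) : Int) = n % 16384 by omega] at htc
    rw [show ((16384 - (n % 16384).toNat : Nat) : Int) = 16384 - n % 16384 by omega] at htc
    rw [htc]
    obtain ⟨hs0, hs1⟩ := pv_band_16382_bounds (16384 - n % 16384)
    set s := PySem.Int.band (16384 - n % 16384) 16382 with hsdef
    rw [show min (s + 33) (8191 : Int) = if s + 33 > 8191 then (8191 : Int) else s + 33 by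
      rw [Int.min_def]; split_ifs <;> omega]
    set v : Int := if s + 33 > 8191 then (8191 : Int) else s + 33 with hvdef
    exact pv_tail 128 v (Or.inr rfl) (by rw [hvdef]; split_ifs <;> omega)
      (by rw [hvdef]; split_ifs <;> omega)
  · simp only [if_neg hsgn, show ((0 : Int) = 128) = False by norm_num, if_false]
    have h13 : n % 16384 < 8192 := by
      by_contra hc
      exact hsgn ((pv_sign_test (n % 16384) hm0 hm1).mpr (by omega))
    set s := n % 16384 with hsdef
    rw [show min (s + 33) (8191 : Int) = if s + 33 > 8191 then (8191 : Int) else s + 33 by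
      rw [Int.min_def]; split_ifs <;> omega]
    set v : Int := if s + 33 > 8191 then (8191 : Int) else s + 33 with hvdef
    exact pv_tail 0 v (Or.inl rfl) (by rw [hvdef]; split_ifs <;> omega)
      (by rw [hvdef]; split_ifs <;> omega)
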